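-- pv_equiv track=rewrite | github.com/pypi-data/pypi-mirror-53 | packages/CasFinder/CasFinder-0.0.1.tar.gz/CasFinder-0.0.1/CasFinder/Get_every_protein.py | translater
-- ===== SOURCE A (Python) =====
-- def translater(sequence,threshold): #sequence = protein seq, threshold = min len
--     protein_box = []
--     protein_seq = []
--     position = []
--     count = -1
--     for x in sequence:
--         count = count + 1
--         if protein_seq != [] and x != '*':
--             protein_seq[0] = protein_seq[0] + x
--         if protein_seq == [] and x =='M':
--             protein_seq.append(x)
--             front = count
--         if x == '*' and protein_seq != []:
--             protein_seq[0] = protein_seq[0] + x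
--             if len(protein_seq[0]) >= 0:
--                 back = count
--                 protein_box.append(protein_seq[0])
--                 position.append([front*3,back*3])
--                 front = 0
--                 back = 0
--             protein_seq = []
--
--     return protein_box ,position
-- ===== SOURCE B (Python) =====
-- def translater(sequence, threshold):
--     # scan by jumping with str.find instead of a char-by-char state machine
--     def go(s, off):
--         m = s.find('M')
--         if m == -1:
--             return [], []
--         t = s.find('*', m + 1)
--         if t == -1:
--             return [], []
--         box, pos = go(s[t + 1:], off + t + 1)
--         return [s[m:t + 1]] + box, [[(off + m) * 3, (off + t) * 3]] + pos
--     return go(sequence, 0)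
-- ===== Notes on version B (the rewrite author's own statement) =====
-- stated objective: faster
-- what changed: Replaces A's char-by-char state machine (mutable protein_seq/count/front state and per-character string concatenation) by a recursive jump scan that uses str.find to locate each 'M' and its following '*' and slices the protein out directly.
import Mathlib
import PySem

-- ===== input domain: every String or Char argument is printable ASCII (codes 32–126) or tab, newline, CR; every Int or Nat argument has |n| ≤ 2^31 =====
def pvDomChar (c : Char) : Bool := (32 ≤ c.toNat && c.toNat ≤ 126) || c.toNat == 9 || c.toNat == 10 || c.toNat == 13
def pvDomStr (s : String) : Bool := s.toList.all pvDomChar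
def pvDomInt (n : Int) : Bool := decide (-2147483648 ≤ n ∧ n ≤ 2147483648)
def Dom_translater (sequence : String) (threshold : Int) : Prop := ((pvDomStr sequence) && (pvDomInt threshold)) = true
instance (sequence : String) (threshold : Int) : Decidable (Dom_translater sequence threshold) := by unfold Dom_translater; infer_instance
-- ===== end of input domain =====

-- B replaces A's char-by-char state machine by jump-scanning with str.find ('M', then the next '*');
-- same return value on every input, threshold is ignored by both exactly as in A.

-- ===== PORT A =====
-- State: (protein_box, protein_seq as Option (List Char) — none = empty list, some p = [p] —,
-- position, count, front). Python's `front` is unbound before the first 'M' but is never read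
-- before being assigned, so the port initialises it to 0. Strings are carried as List Char.
def translaterStep (st : List String × Option (List Char) × List (List Int) × Int × Int)
    (x : Char) : List String × Option (List Char) × List (List Int) × Int × Int :=
  match st with
  | (box, seq, pos, count, front) =>
    let count := count + 1
    -- if protein_seq != [] and x != '*': protein_seq[0] = protein_seq[0] + x
    let seq := match seq with
      | some p => if x ≠ '*' then some (p ++ [x]) else some p
      | none => none
    -- if protein_seq == [] and x == 'M': protein_seq.append(x); front = count
    let (seq, front) := match seq with
      | none => if x = 'M' then (some [x], count) else (none, front)
      | some p => (some p, front)
    -- if x == '*' and protein_seq != []: append '*', record, reset (the inner `len >= 0` test is always true)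
    match seq with
    | some p =>
      if x = '*' then
        (box ++ [String.ofList (p ++ [x])], none, pos ++ [[front * 3, count * 3]], count, (0 : Int))
      else (box, some p, pos, count, front)
    | none => (box, none, pos, count, front)

def translater (sequence : String) (_threshold : Int) : List String × List (List Int) :=
  let r := sequence.toList.foldl translaterStep ([], none, [], -1, 0)
  (r.1, r.2.2.1)

-- ===== PORT B =====
-- go(s, off): m = s.find('M'); t = s.find('*', m + 1); emit s[m:t+1] and [(off+m)*3, (off+t)*3],
-- recurse on s[t+1:]. Python's find returning -1 is ported as findIdx? returning none; the slice
-- s[m:t+1] is (l.drop m).take (t - m + 1) with t = m + 1 + t'.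
def translaterGo (l : List Char) (off : Int) : List String × List (List Int) :=
  match hm : l.findIdx? (· = 'M') with
  | none => ([], [])
  | some m =>
    match (l.drop (m + 1)).findIdx? (· = '*') with
    | none => ([], [])
    | some t' =>
      let t := m + 1 + t'
      let (box, pos) := translaterGo (l.drop (t + 1)) (off + (t : Int) + 1)
      (String.ofList ((l.drop m).take (t - m + 1)) :: box,
        [(off + (m : Int)) * 3, (off + (t : Int)) * 3] :: pos)
termination_by l.length
decreasing_by
  have hm' := (List.findIdx?_eq_some_iff_findIdx_eq.mp hm).1
  simp; omega

def translater_alt (sequence : String) (_threshold : Int) : List String × List (List Int) :=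
  translaterGo sequence.toList 0

-- ===== PRECONDITION & SPEC =====
def Spec_translater (sequence : String) (threshold : Int) (out : List String × List (List Int)) : Prop := out = translater_alt sequence threshold
instance (sequence : String) (threshold : Int) (out : List String × List (List Int)) : Decidable (Spec_translater sequence threshold out) := by unfold Spec_translater; infer_instance

-- ===== CLAIM (what is proved, stated in full; the proofs are below) =====
def Claim_equal_translater : Prop := ∀ (sequence : String) (threshold : Int), Dom_translater sequence threshold → Spec_translater sequence threshold (translater sequence threshold)

-- ===== LEMMAS AND PROOFS =====

-- Unfolding lemmas for translaterGo (its dependent match blocks direct rewriting).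
theorem go_no_M (l : List Char) (off : Int) (h : l.findIdx? (· = 'M') = none) :
    translaterGo l off = ([], []) := by
  rw [translaterGo]; split
  · rfl
  · rename_i m hm; rw [h] at hm; cases hm

theorem go_no_star (l : List Char) (off : Int) (m : Nat) (hm : l.findIdx? (· = 'M') = some m)
    (ht : (l.drop (m + 1)).findIdx? (· = '*') = none) : translaterGo l off = ([], []) := by
  rw [translaterGo]; split
  · rfl
  · rename_i m' hm'
    rw [hm] at hm'; injection hm' with e; subst e
    rw [ht]

theorem go_found (l : List Char) (off : Int) (m t' : Nat) (hm : l.findIdx? (· = 'M') = some m)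
    (ht : (l.drop (m + 1)).findIdx? (· = '*') = some t') :
    translaterGo l off
      = (String.ofList ((l.drop m).take (t' + 2))
            :: (translaterGo (l.drop (m + 1 + t' + 1)) (off + (m : Int) + (t' : Int) + 2)).1,
         [(off + (m : Int)) * 3, (off + (m : Int) + 1 + (t' : Int)) * 3]
            :: (translaterGo (l.drop (m + 1 + t' + 1)) (off + (m : Int) + (t' : Int) + 2)).2) := by
  rw [translaterGo]; split
  · rename_i hm'; rw [hm] at hm'; cases hm'
  · rename_i m' hm'
    rw [hm] at hm'; injection hm' with e; subst e
    rw [ht]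
    have e1 : m + 1 + t' - m + 1 = t' + 2 := by omega
    have e3 : off + ((m : Int) + 1 + (t' : Int)) = off + (m : Int) + 1 + (t' : Int) := by ring
    simp only [push_cast, e1, e3]
    rw [show off + (m : Int) + 1 + (t' : Int) + 1 = off + (m : Int) + (t' : Int) + 2 from by ring]

-- translaterGo skips a leading non-'M' character.
theorem go_cons_not_M (x : Char) (xs : List Char) (off : Int) (hx : x ≠ 'M') :
    translaterGo (x :: xs) off = translaterGo xs (off + 1) := by
  cases hm : xs.findIdx? (· = 'M') with
  | none =>
    rw [go_no_M xs _ hm, go_no_M (x :: xs) _ (by simp [List.findIdx?_cons, hx, hm])]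
  | some m =>
    have hmc : (x :: xs).findIdx? (· = 'M') = some (m + 1) := by
      simp [List.findIdx?_cons, hx, hm]
    cases ht : (xs.drop (m + 1)).findIdx? (· = '*') with
    | none =>
      rw [go_no_star xs _ m hm ht, go_no_star (x :: xs) _ (m + 1) hmc (by simpa using ht)]
    | some t' =>
      rw [go_found xs _ m t' hm ht, go_found (x :: xs) _ (m + 1) t' hmc (by simpa using ht)]
      rw [show m + 1 + 1 + t' + 1 = (m + 1 + t' + 1) + 1 from by omega]
      simp only [List.drop_succ_cons]
      push_cast
      ring_nf

-- The invariant in the "searching for 'M'" state: the fold appends exactly what translaterGo emits.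
def NoneP (l : List Char) : Prop :=
  ∀ (box : List String) (pos : List (List Int)) (count front : Int),
    (l.foldl translaterStep (box, none, pos, count, front)).1
        = box ++ (translaterGo l (count + 1)).1
    ∧ (l.foldl translaterStep (box, none, pos, count, front)).2.2.1
        = pos ++ (translaterGo l (count + 1)).2

-- The invariant in the "inside a protein" state (text so far p, started at index front).
def InsideP (l : List Char) : Prop :=
  ∀ (box : List String) (p : List Char) (pos : List (List Int)) (count front : Int),
    (l.findIdx? (· = '*') = none →
      (l.foldl translaterStep (box, some p, pos, count, front)).1 = box
      ∧ (l.foldl translaterStep (box, some p, pos, count, front)).2.2.1 = pos)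
    ∧ (∀ t : Nat, l.findIdx? (· = '*') = some t →
      (l.foldl translaterStep (box, some p, pos, count, front)).1
          = box ++ [String.ofList (p ++ l.take (t + 1))]
              ++ (translaterGo (l.drop (t + 1)) (count + (t : Int) + 2)).1
      ∧ (l.foldl translaterStep (box, some p, pos, count, front)).2.2.1
          = pos ++ [[front * 3, (count + 1 + (t : Int)) * 3]]
              ++ (translaterGo (l.drop (t + 1)) (count + (t : Int) + 2)).2)

-- One combined strong induction on the length discharges both invariants.
theorem mainInv : ∀ n : Nat, ∀ l : List Char, l.length ≤ n → NoneP l ∧ InsideP l := by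
  intro n
  induction n with
  | zero =>
    intro l hl
    have : l = [] := List.eq_nil_of_length_eq_zero (Nat.le_zero.mp hl)
    subst this
    constructor
    · intro box pos count front
      rw [go_no_M _ _ (by simp)]; simp [List.foldl]
    · intro box p pos count front
      exact ⟨fun _ => by simp [List.foldl], fun t ht => by simp at ht⟩
  | succ n ih =>
    intro l hl
    cases l with
    | nil =>
      constructor
      · intro box pos count front
        rw [go_no_M _ _ (by simp)]; simp [List.foldl]
      · intro box p pos count front
        exact ⟨fun _ => by simp [List.foldl], fun t ht => by simp at ht⟩
    | cons x xs =>
      have hxs : xs.length ≤ n := by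
        have := hl; simp at this; omega
      have ihx := ih xs hxs
      constructor
      · -- NoneP (x :: xs)
        intro box pos count front
        by_cases hM : x = 'M'
        · subst hM
          have hstep : translaterStep (box, none, pos, count, front) 'M'
              = (box, some ['M'], pos, count + 1, count + 1) := by
            simp [translaterStep]
          rw [List.foldl_cons, hstep]
          cases ht : xs.findIdx? (· = '*') with
          | none =>
            have h := ((ihx.2) box ['M'] pos (count + 1) (count + 1)).1 ht
            rw [go_no_star ('M' :: xs) _ 0 (by simp [List.findIdx?_cons]) (by simpa using ht)]
            simpa using h
          | some t =>
            have h := ((ihx.2) box ['M'] pos (count + 1) (count + 1)).2 t ht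
            rw [go_found ('M' :: xs) _ 0 t (by simp [List.findIdx?_cons]) (by simpa using ht)]
            have ed : (0 : Nat) + 1 + t + 1 = t + 2 := by omega
            rw [ed]
            constructor
            · rw [h.1]
              simp only [List.drop_zero, List.take_succ_cons, List.drop_succ_cons,
                List.cons_append, List.append_assoc]
              push_cast
              ring_nf
              simp
            · rw [h.2]
              simp only [List.drop_succ_cons, List.cons_append, List.append_assoc]
              push_cast
              ring_nf
              simp
        · -- x ≠ 'M': stays in the searching state
          have hstep : translaterStep (box, none, pos, count, front) x
              = (box, none, pos, count + 1, front) := by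
            simp only [translaterStep]
            by_cases hs : x = '*'
            · subst hs; simp
            · simp [hM]
          rw [List.foldl_cons, hstep, go_cons_not_M x xs (count + 1) hM]
          have h := (ihx.1) box pos (count + 1) front
          exact ⟨h.1, h.2⟩
      · -- InsideP (x :: xs)
        intro box p pos count front
        by_cases hs : x = '*'
        · subst hs
          have hstep : translaterStep (box, some p, pos, count, front) '*'
              = (box ++ [String.ofList (p ++ ['*'])], none,
                  pos ++ [[front * 3, (count + 1) * 3]], count + 1, 0) := by
            simp [translaterStep]
          constructor
          · intro ht; simp [List.findIdx?_cons] at ht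
          · intro t ht
            rw [List.findIdx?_cons] at ht
            have ht0 : t = 0 := by simpa using ht.symm
            subst ht0
            rw [List.foldl_cons, hstep]
            have h := (ihx.1) (box ++ [String.ofList (p ++ ['*'])])
              (pos ++ [[front * 3, (count + 1) * 3]]) (count + 1) 0
            constructor
            · rw [h.1]
              simp only [List.take_succ_cons, List.take_zero, List.drop_succ_cons, List.drop_zero]
              push_cast
              ring_nf
            · rw [h.2]
              simp only [List.drop_succ_cons, List.drop_zero]
              push_cast
              ring_nf
        · -- x ≠ '*': keep accumulating
          have hstep : translaterStep (box, some p, pos, count, front) x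
              = (box, some (p ++ [x]), pos, count + 1, front) := by
            simp [translaterStep, hs]
          rw [List.foldl_cons, hstep]
          have h := (ihx.2) box (p ++ [x]) pos (count + 1) front
          constructor
          · intro ht
            simp only [List.findIdx?_cons, decide_eq_true_eq, if_neg hs] at ht
            exact h.1 (by simpa using ht)
          · intro t ht
            simp only [List.findIdx?_cons, decide_eq_true_eq, if_neg hs] at ht
            cases ht' : xs.findIdx? (· = '*') with
            | none => rw [ht'] at ht; simp at ht
            | some t0 =>
              rw [ht'] at ht
              simp only [Option.map_some, Option.some.injEq] at ht
              subst ht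
              have h2 := h.2 t0 ht'
              constructor
              · rw [h2.1]
                simp only [List.take_succ_cons, List.drop_succ_cons, List.append_assoc,
                  List.cons_append]
                push_cast
                ring_nf
                simp
              · rw [h2.2]
                simp only [List.drop_succ_cons]
                push_cast
                ring_nf

-- ===== VERDICT (by name: the statement is the Claim_ definition above) =====
theorem translater_spec : Claim_equal_translater := by
  intro sequence threshold _
  unfold Spec_translater translater translater_alt
  have h := ((mainInv sequence.toList.length sequence.toList le_rfl).1) [] [] (-1) 0
  rw [show (-1 : Int) + 1 = 0 from by ring] at h
  exact Prod.ext (by simpa using h.1) (by simpa using h.2)
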